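-- pv_equiv track=rewrite | github.com/brondibur/competitiveProgramming | HackerRank/Challenges/sequenceEquation.py | permutationEquation
-- ===== SOURCE A (Python) =====
-- def permutationEquation(p):
--     ans = []
--     for i in range(len(p)):
--         for j in range(len(p)):
--             if (i+1) == p[j]:
--                 for k in range(len(p)):
--                     if p[k] == j+1:
--                         ans.append(k+1)
--     return ans
-- ===== SOURCE B (Python) =====
-- def permutationEquation(p):
--     # One-pass position index: pos[v] = ascending 1-based positions of v in p.
--     # Then for each x = 1..n chain two lookups, concatenating the final
--     # position lists.  Replaces A's three nested scans.
--     pos = {}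
--     for idx, v in enumerate(p, 1):
--         pos.setdefault(v, []).append(idx)
--     ans = []
--     for x in range(1, len(p) + 1):
--         for j1 in pos.get(x, ()):
--             ans.extend(pos.get(j1, ()))
--     return ans
-- ===== Notes on version B (the rewrite author's own statement) =====
-- stated objective: faster
-- what changed: Replaces A's three nested index scans with a position index (dict value -> ascending 1-based positions) built in one pass, then one resolution pass chaining two dictionary lookups per x.
import Mathlib
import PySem

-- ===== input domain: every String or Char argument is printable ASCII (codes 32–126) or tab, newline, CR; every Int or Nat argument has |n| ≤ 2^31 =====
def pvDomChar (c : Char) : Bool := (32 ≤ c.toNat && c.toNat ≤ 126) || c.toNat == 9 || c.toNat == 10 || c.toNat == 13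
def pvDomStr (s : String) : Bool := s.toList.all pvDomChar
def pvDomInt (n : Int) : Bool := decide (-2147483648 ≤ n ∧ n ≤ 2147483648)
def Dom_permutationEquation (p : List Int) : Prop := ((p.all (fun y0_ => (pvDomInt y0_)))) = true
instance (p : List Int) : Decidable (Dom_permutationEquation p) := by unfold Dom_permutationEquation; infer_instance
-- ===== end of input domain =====

-- B builds a one-pass position index (value -> ascending 1-based positions) and resolves each
-- x = 1..n by chaining two lookups, instead of A's three nested scans; faster in a timing run.

-- ===== PORT A =====
def permutationEquation (p : List Int) : List Int :=
  (PySem.List.pyRange 0 (p.length : Int) 1).foldl (fun ans i =>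
    (PySem.List.pyRange 0 (p.length : Int) 1).foldl (fun ans j =>
      if i + 1 = PySem.List.pyGetD p j 0 then
        (PySem.List.pyRange 0 (p.length : Int) 1).foldl (fun ans k =>
          if PySem.List.pyGetD p k 0 = j + 1 then ans ++ [k + 1] else ans) ans
      else ans) ans) []

-- ===== PORT B =====
def permutationEquation_alt (p : List Int) : List Int :=
  let pos := (PySem.List.enumerate p 1).foldl
      (fun d iv => d.modify iv.2 ([] : List Int) (fun l => l ++ [iv.1])) PySem.Dict.empty
  (PySem.List.pyRange 1 ((p.length : Int) + 1) 1).foldl (fun ans x =>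
    (pos.getD x []).foldl (fun ans j1 => ans ++ pos.getD j1 []) ans) []

-- ===== PRECONDITION & SPEC =====
def Spec_permutationEquation (p : List Int) (out : List Int) : Prop := out = permutationEquation_alt p
instance (p : List Int) (out : List Int) : Decidable (Spec_permutationEquation p out) := by unfold Spec_permutationEquation; infer_instance

-- ===== CLAIM (what is proved, stated in full; the proofs are below) =====
def Claim_equal_permutationEquation : Prop := ∀ (p : List Int), Dom_permutationEquation p → Spec_permutationEquation p (permutationEquation p)

-- ===== LEMMAS AND PROOFS =====

-- ascending list of 1-based positions of v in p (the common normal form of both programs)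
def pvOcc (p : List Int) (v : Int) : List Int :=
  ((List.range p.length).filter (fun k => p.getD k 0 == v)).map (fun k : Nat => (k : Int) + 1)

-- the dict built by B's first loop looks up to exactly pvOcc
lemma pvPos_getD (l : List (Int × Int)) (d : PySem.Dict Int (List Int)) (v : Int) :
    (l.foldl (fun d iv => d.modify iv.2 ([] : List Int) (fun l => l ++ [iv.1])) d).getD v []
      = d.getD v [] ++ (l.filter (fun q => q.2 == v)).map (·.1) := by
  induction l generalizing d with
  | nil => simp
  | cons a t ih =>
    simp only [List.foldl_cons, ih, List.filter_cons]
    rw [PySem.Dict.getD_modify]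
    by_cases h : a.2 = v
    · subst h
      rw [if_pos rfl]
      simp [List.append_assoc]
    · rw [if_neg (fun hh => h hh.symm)]
      simp [h]

lemma pvEnum_occ (p : List Int) (v : Int) (s : Int) :
    ((PySem.List.enumerate p s).filter (fun q => q.2 == v)).map (·.1)
      = ((List.range p.length).filter (fun k => p.getD k 0 == v)).map (fun k : Nat => s + (k : Int)) := by
  induction p generalizing s with
  | nil => simp [PySem.List.enumerate]
  | cons a t ih =>
    rw [PySem.List.enumerate_cons, List.length_cons, List.range_succ_eq_map]
    simp only [List.filter_cons, List.filter_map, List.getD_cons_zero]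
    have hf : ((fun k => (a :: t).getD k 0 == v) ∘ Nat.succ) = (fun k => t.getD k 0 == v) := by
      funext k; simp
    have htail : ((PySem.List.enumerate t (s + 1)).filter (fun q => q.2 == v)).map (·.1)
        = ((List.range t.length).filter (fun k => t.getD k 0 == v)).map
            ((fun k : Nat => s + (k : Int)) ∘ Nat.succ) := by
      rw [ih]
      refine List.map_congr_left (fun k _ => ?_)
      simp only [Function.comp_apply]
      push_cast
      ring
    by_cases h : a = v
    · subst h
      rw [if_pos (by simp), if_pos (by simp)]
      rw [List.map_cons, List.map_cons, List.map_map, hf, htail]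
      norm_num
    · rw [if_neg (by simpa using h), if_neg (by simpa using h), hf, List.map_map]
      exact htail

-- lookups in B's dict give exactly pvOcc
lemma pvPos_occ (p : List Int) (v : Int) :
    ((PySem.List.enumerate p 1).foldl
        (fun d iv => d.modify iv.2 ([] : List Int) (fun l => l ++ [iv.1]))
        PySem.Dict.empty).getD v [] = pvOcc p v := by
  rw [pvPos_getD, PySem.Dict.getD_empty, List.nil_append, pvEnum_occ]
  unfold pvOcc
  refine List.map_congr_left (fun k _ => ?_)
  ring

lemma pvDecide_eq_beq (x v : Int) : decide (x = v) = (x == v) := by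
  by_cases h : x = v <;> simp [h]

lemma pvBeq_eq_decide (x v : Int) : (x == v) = decide (v = x) := by
  by_cases h : x = v
  · simp [h]
  · simp [h, Ne.symm h]

-- A's innermost loop in closed form
lemma pvInner (p : List Int) (v : Int) (ans : List Int) :
    (PySem.List.pyRange 0 (p.length : Int) 1).foldl
        (fun ans k => if PySem.List.pyGetD p k 0 = v then ans ++ [k + 1] else ans) ans
      = ans ++ pvOcc p v := by
  rw [PySem.List.pyRange_zero_nat, List.foldl_map, PySem.List.foldl_append_ite]
  unfold pvOcc
  congr 1
  congr 1
  refine List.filter_congr (fun k _ => ?_)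
  simp only [PySem.List.pyGetD_natCast]
  exact pvDecide_eq_beq _ _

-- A's middle loop in closed form
lemma pvMid (p : List Int) (i : Int) (ans : List Int) :
    (PySem.List.pyRange 0 (p.length : Int) 1).foldl
        (fun ans j => if i + 1 = PySem.List.pyGetD p j 0 then
          (PySem.List.pyRange 0 (p.length : Int) 1).foldl
            (fun ans k => if PySem.List.pyGetD p k 0 = j + 1 then ans ++ [k + 1] else ans) ans
        else ans) ans
      = ans ++ (pvOcc p (i + 1)).flatMap (pvOcc p) := by
  have hbody : (PySem.List.pyRange 0 (p.length : Int) 1).foldl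
        (fun ans j => if i + 1 = PySem.List.pyGetD p j 0 then
          (PySem.List.pyRange 0 (p.length : Int) 1).foldl
            (fun ans k => if PySem.List.pyGetD p k 0 = j + 1 then ans ++ [k + 1] else ans) ans
        else ans) ans
      = (PySem.List.pyRange 0 (p.length : Int) 1).foldl
        (fun ans j => if i + 1 = PySem.List.pyGetD p j 0 then ans ++ pvOcc p (j + 1) else ans) ans := by
    refine PySem.List.foldl_congr_mem _ _ _ _ (fun acc x _ => ?_)
    by_cases h : i + 1 = PySem.List.pyGetD p x 0
    · rw [if_pos h, if_pos h, pvInner]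
    · rw [if_neg h, if_neg h]
  rw [hbody, PySem.List.pyRange_zero_nat, List.foldl_map,
    PySem.List.foldl_ite_eq_foldl_filter, PySem.List.foldl_append_eq_flatMap]
  congr 1
  conv_rhs => rw [pvOcc]
  rw [List.flatMap_map]
  congr 1
  refine List.filter_congr (fun k _ => ?_)
  simp only [PySem.List.pyGetD_natCast]
  exact (pvBeq_eq_decide _ _).symm

-- A's three nested loops in closed form
lemma pvA_eq (p : List Int) :
    permutationEquation p
      = (List.range p.length).flatMap (fun i : Nat => (pvOcc p ((i : Int) + 1)).flatMap (pvOcc p)) := by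
  unfold permutationEquation
  have hbody := PySem.List.foldl_congr_mem
    (l := PySem.List.pyRange 0 (p.length : Int) 1)
    (f := fun ans i => (PySem.List.pyRange 0 (p.length : Int) 1).foldl
        (fun ans j => if i + 1 = PySem.List.pyGetD p j 0 then
          (PySem.List.pyRange 0 (p.length : Int) 1).foldl
            (fun ans k => if PySem.List.pyGetD p k 0 = j + 1 then ans ++ [k + 1] else ans) ans
        else ans) ans)
    (g := fun ans i => ans ++ (pvOcc p (i + 1)).flatMap (pvOcc p))
    (init := ([] : List Int))
    (fun acc x _ => pvMid p x acc)
  rw [hbody, PySem.List.pyRange_zero_nat, List.foldl_map, PySem.List.foldl_append_eq_flatMap,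
    List.nil_append]

-- B in the same closed form
lemma pvB_eq (p : List Int) :
    permutationEquation_alt p
      = (List.range p.length).flatMap (fun i : Nat => (pvOcc p ((i : Int) + 1)).flatMap (pvOcc p)) := by
  unfold permutationEquation_alt
  simp only [pvPos_occ]
  have hbody := PySem.List.foldl_congr_mem
    (l := PySem.List.pyRange 1 ((p.length : Int) + 1) 1)
    (f := fun ans x => (pvOcc p x).foldl (fun ans j1 => ans ++ pvOcc p j1) ans)
    (g := fun ans x => ans ++ (pvOcc p x).flatMap (pvOcc p))
    (init := ([] : List Int))
    (fun acc x _ => PySem.List.foldl_append_eq_flatMap _ _ _)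
  rw [hbody, PySem.List.foldl_append_eq_flatMap, List.nil_append]
  rw [PySem.List.pyRange_one]
  have h1 : ((p.length : Int) + 1 - 1).toNat = p.length := by omega
  rw [h1, List.flatMap_map]
  congr 1
  funext a
  rw [add_comm]

-- ===== VERDICT (by name: the statement is the Claim_ definition above) =====
theorem permutationEquation_spec : Claim_equal_permutationEquation := by
  intro p _hd
  unfold Spec_permutationEquation
  rw [pvA_eq, pvB_eq]
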